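-- pv_equiv track=rewrite | github.com/rinantropova/python_intro_lectures | homework_6/task_2.py | find_index_rec
-- ===== SOURCE A (Python) =====
-- def find_index_rec(one_list, min_d, max_d, index=0, new_list=None):
--     if new_list is None:
--         new_list = []
--     if index >= len(one_list):
--         return new_list
--     elif min_d <= one_list[index] <= max_d:
--         new_list.append(index)
--     return find_index_rec(one_list, min_d, max_d, index + 1, new_list)
-- ===== SOURCE B (Python) =====
-- def find_index_rec(one_list, min_d, max_d, index=0, new_list=None):
--     if new_list is None:
--         new_list = []
--     for i in range(index, len(one_list)):
--         if min_d <= one_list[i] <= max_d: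
--             new_list.append(i)
--     return new_list
-- ===== Notes on version B (the rewrite author's own statement) =====
-- stated objective: simpler
-- what changed: Replaces the tail recursion (one Python call frame per element) with a single explicit for-loop over range(index, len(one_list)) appending to the same new_list.
-- outside the precondition, e.g. on find_index_rec([1, 2], 0, 5, -5, None): A raises IndexError, B raises IndexError
import Mathlib
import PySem

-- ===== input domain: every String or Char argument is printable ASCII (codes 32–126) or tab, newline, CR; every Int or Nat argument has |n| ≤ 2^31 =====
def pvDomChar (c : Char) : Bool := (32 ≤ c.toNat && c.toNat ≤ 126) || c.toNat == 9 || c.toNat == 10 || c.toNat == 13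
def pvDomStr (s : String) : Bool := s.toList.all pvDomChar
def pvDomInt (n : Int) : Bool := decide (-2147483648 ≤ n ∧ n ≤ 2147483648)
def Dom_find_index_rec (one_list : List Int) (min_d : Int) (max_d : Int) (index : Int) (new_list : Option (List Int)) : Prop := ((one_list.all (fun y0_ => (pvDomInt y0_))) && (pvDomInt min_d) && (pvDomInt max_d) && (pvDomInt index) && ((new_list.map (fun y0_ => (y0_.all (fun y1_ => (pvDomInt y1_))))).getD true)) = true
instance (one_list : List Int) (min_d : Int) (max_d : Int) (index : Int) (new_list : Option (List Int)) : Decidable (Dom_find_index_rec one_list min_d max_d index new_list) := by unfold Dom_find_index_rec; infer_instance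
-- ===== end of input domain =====

-- B replaces A's tail recursion with one explicit loop over range(index, len), same appends; objective: simpler.


-- ===== PORT A =====
-- the recursive body of A after the `new_list is None` guard has run
def find_index_rec_go (one_list : List Int) (min_d : Int) (max_d : Int) (index : Int) (nl : List Int) : List Int :=
  if index ≥ (one_list.length : Int) then nl
  else
    find_index_rec_go one_list min_d max_d (index + 1)
      (match PySem.List.pyGet? one_list index with
       | some v => if min_d ≤ v ∧ v ≤ max_d then nl ++ [index] else nl
       | none => nl)   -- Python raises IndexError here; excluded by Pre_find_index_rec
termination_by ((one_list.length : Int) - index).toNat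
decreasing_by omega

def find_index_rec (one_list : List Int) (min_d : Int) (max_d : Int) (index : Int) (new_list : Option (List Int)) : List Int :=
  find_index_rec_go one_list min_d max_d index (new_list.getD [])

-- ===== PORT B =====
def find_index_rec_alt (one_list : List Int) (min_d : Int) (max_d : Int) (index : Int) (new_list : Option (List Int)) : List Int :=
  (PySem.List.pyRange index (one_list.length : Int) 1).foldl
    (fun acc i =>
      match PySem.List.pyGet? one_list i with
      | some v => if min_d ≤ v ∧ v ≤ max_d then acc ++ [i] else acc
      | none => acc)   -- Python raises IndexError here; excluded by Pre_find_index_rec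
    (new_list.getD [])

-- ===== PRECONDITION & SPEC =====
-- A raises IndexError iff index < -len(one_list) (a negative index past the front is hit); both programs raise there.
def Pre_find_index_rec (one_list : List Int) (min_d : Int) (max_d : Int) (index : Int) (new_list : Option (List Int)) : Prop :=
  -(one_list.length : Int) ≤ index
instance (one_list : List Int) (min_d : Int) (max_d : Int) (index : Int) (new_list : Option (List Int)) : Decidable (Pre_find_index_rec one_list min_d max_d index new_list) := by unfold Pre_find_index_rec; infer_instance
def pvWitness_find_index_rec : List Int × Int × Int × Int × Option (List Int) := ([1, 5, 3], 2, 5, 0, none)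

def Spec_find_index_rec (one_list : List Int) (min_d : Int) (max_d : Int) (index : Int) (new_list : Option (List Int)) (out : List Int) : Prop := out = find_index_rec_alt one_list min_d max_d index new_list
instance (one_list : List Int) (min_d : Int) (max_d : Int) (index : Int) (new_list : Option (List Int)) (out : List Int) : Decidable (Spec_find_index_rec one_list min_d max_d index new_list out) := by unfold Spec_find_index_rec; infer_instance

-- ===== CLAIM (what is proved, stated in full; the proofs are below) =====
def Claim_equal_find_index_rec : Prop := ∀ (one_list : List Int) (min_d : Int) (max_d : Int) (index : Int) (new_list : Option (List Int)), Dom_find_index_rec one_list min_d max_d index new_list → Pre_find_index_rec one_list min_d max_d index new_list → Spec_find_index_rec one_list min_d max_d index new_list (find_index_rec one_list min_d max_d index new_list)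

-- ===== LEMMAS AND PROOFS =====
lemma find_index_rec_go_eq_foldl (one_list : List Int) (min_d max_d : Int) :
    ∀ (n : Nat) (index : Int) (nl : List Int), ((one_list.length : Int) - index).toNat = n →
      find_index_rec_go one_list min_d max_d index nl =
        (PySem.List.pyRange index (one_list.length : Int) 1).foldl
          (fun acc i =>
            match PySem.List.pyGet? one_list i with
            | some v => if min_d ≤ v ∧ v ≤ max_d then acc ++ [i] else acc
            | none => acc) nl := by
  intro n
  induction n with
  | zero =>
    intro index nl h
    have hge : index ≥ (one_list.length : Int) := by omega
    rw [find_index_rec_go, if_pos hge, PySem.List.pyRange_one_eq_nil hge, List.foldl_nil]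
  | succ n ih =>
    intro index nl h
    have hlt : index < (one_list.length : Int) := by omega
    rw [find_index_rec_go, if_neg (by omega), PySem.List.pyRange_one_cons hlt, List.foldl_cons]
    exact ih (index + 1) _ (by omega)

-- ===== VERDICT (by name: the statement is the Claim_ definition above) =====
theorem find_index_rec_spec : Claim_equal_find_index_rec := by
  intro one_list min_d max_d index new_list _ _
  unfold Spec_find_index_rec find_index_rec find_index_rec_alt
  exact find_index_rec_go_eq_foldl one_list min_d max_d _ index _ rfl
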